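-- pv_equiv track=rewrite | github.com/SantiagoPanozzo/Python-PGM1-UCU | Diccionarios/Ejercicios/Ejercicio8.py | maldad
-- ===== SOURCE A (Python) =====
-- def maldad(lista):
--     # estos diccionarios son intermedios para convertir datos:
--     dict2 = dict()
--     dict3 = dict()
--     # personas son los Nombres, correo son las *LISTAS* de correos asignadas a cada Nombre (en caso de que alguien ponga un string funciona igual)
--     for persona in lista:
--         correo = lista[persona]
--         if type(correo) is list:
--             # iteramos por cada correo en la lista de correos de cada Nombre
--             for i in correo:
--                 # si no tiene arroba o punto ya lo descartamos
--                 if ('@' or '.') not in i: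
--                     continue
--                 # si no esta ya en el dict2 lo agregamos, si esta repetido se descarta directamente
--                 if i not in dict2: dict2[i] = persona
--                 # funciona porque ahora son "correos:Nombres" en vez de "Nombres:correos", se entiende que
--                 # los Nombres no se van a repetir, pero si un correo se repite pasamos
--         else:
--             # si el correo no fuera una lista no necesitamos iterar nada
--             if correo not in dict2:
--                 if ('@' and '.') in i: dict2[correo] = persona
--     # correo ahora pasa a ser los correos (keys) de dict2, persona pasa a ser los Nombres asignados a cada correo
--     for correo in dict2:
--         persona = dict2[correo]
--         # pasamos los Nombres a keys del dict3 y los correos a su valor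
--         if persona not in dict3:
--             dict3[persona] = [correo]
--         else:
--             # si ya hay un correo asignado a una persona, extendemos la lista para incluir el nuevo correo
--             previos = list()
--             previos.extend(dict3[persona])
--             previos.extend([correo])
--             dict3[persona] = previos
--     return dict3
-- ===== SOURCE B (Python) =====
-- def maldad(lista):
--     # Single pass: a 'seen' set for duplicate emails, building the result directly.
--     seen = set()
--     dict3 = {}
--     for persona, correos in lista.items():
--         for i in correos:
--             if '@' in i and i not in seen:
--                 seen.add(i)
--                 dict3.setdefault(persona, []).append(i)
--     return dict3
-- ===== Notes on version B (the rewrite author's own statement) =====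
-- stated objective: simpler
-- what changed: A builds an intermediate email->name dict and then inverts it with a second loop; B does one fused pass, keeping a 'seen' set of emails and appending each new valid email directly to the result via setdefault.
import Mathlib
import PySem

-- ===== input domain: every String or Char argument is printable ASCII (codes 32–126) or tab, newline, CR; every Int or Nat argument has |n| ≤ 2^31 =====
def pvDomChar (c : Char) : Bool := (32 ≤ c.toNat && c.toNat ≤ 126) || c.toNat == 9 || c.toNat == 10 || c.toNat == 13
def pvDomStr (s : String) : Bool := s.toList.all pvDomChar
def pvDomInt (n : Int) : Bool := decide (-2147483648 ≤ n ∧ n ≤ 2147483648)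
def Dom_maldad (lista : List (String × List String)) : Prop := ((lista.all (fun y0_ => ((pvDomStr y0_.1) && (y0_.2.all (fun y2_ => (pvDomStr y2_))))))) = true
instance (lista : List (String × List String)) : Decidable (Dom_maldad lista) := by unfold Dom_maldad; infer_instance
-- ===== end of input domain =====

-- B replaces A's two-phase scheme (build an email→name dict, then invert it into the
-- result in a second loop) by a single pass with a 'seen' set that builds the result
-- directly; objective: simpler.

-- ===== PORT A =====
-- inner loop body over one email list: skip if '@' not in i (the '('@' or '.')' test
-- is '@' alone in Python), else first writer wins in dict2
def maldadD2Inner (persona : String) (d2 : PySem.Dict String String) (i : String) :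
    PySem.Dict String String :=
  if PySem.Str.isIn "@" i = false then d2
  else if d2.contains i = false then d2.insert i persona else d2

-- first loop: dict2 = email → persona (values are always lists under the stated
-- type dict[str, list[str]], so A's 'else' branch — which would NameError on 'i' — never runs)
def maldadD2 (lista : List (String × List String)) : PySem.Dict String String :=
  lista.foldl (fun d2 pc => pc.2.foldl (maldadD2Inner pc.1) d2) PySem.Dict.empty

-- second loop body: regroup one (correo, persona) pair of dict2 into dict3
def maldadD3Step (d3 : PySem.Dict String (List String)) (cp : String × String) :
    PySem.Dict String (List String) :=
  if d3.contains cp.2 = false then d3.insert cp.2 [cp.1]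
  else d3.insert cp.2 (d3.getD cp.2 [] ++ [cp.1])

def maldad (lista : List (String × List String)) : List (String × List String) :=
  ((maldadD2 lista).items.foldl maldadD3Step PySem.Dict.empty).items

-- ===== PORT B =====
-- one step of B's single pass: state is (seen, dict3)
def maldadAltStep (persona : String)
    (st : PySem.Set String × PySem.Dict String (List String)) (i : String) :
    PySem.Set String × PySem.Dict String (List String) :=
  if PySem.Str.isIn "@" i && !(PySem.Set.contains st.1 i)
  then (PySem.Set.add st.1 i, st.2.modify persona [] (fun l => l ++ [i]))
  else st

def maldad_alt (lista : List (String × List String)) : List (String × List String) :=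
  (lista.foldl (fun st pc => pc.2.foldl (maldadAltStep pc.1) st)
    (PySem.Set.empty, PySem.Dict.empty)).2.items

-- ===== PRECONDITION & SPEC =====
def Spec_maldad (lista : List (String × List String)) (out : List (String × List String)) : Prop := out = maldad_alt lista
instance (lista : List (String × List String)) (out : List (String × List String)) : Decidable (Spec_maldad lista out) := by unfold Spec_maldad; infer_instance

-- ===== CLAIM (what is proved, stated in full; the proofs are below) =====
def Claim_equal_maldad : Prop := ∀ (lista : List (String × List String)), Dom_maldad lista → Spec_maldad lista (maldad lista)

-- ===== LEMMAS AND PROOFS =====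

-- A's second loop, started from the empty dict, as a function of dict2's item list
def pvGroup (l : List (String × String)) : PySem.Dict String (List String) :=
  l.foldl maldadD3Step PySem.Dict.empty

theorem pvGroup_append_singleton (l : List (String × String)) (cp : String × String) :
    pvGroup (l ++ [cp]) = maldadD3Step (pvGroup l) cp := by
  simp [pvGroup, List.foldl_append]

theorem maldadD3Step_eq_modify (d3 : PySem.Dict String (List String)) (cp : String × String) :
    maldadD3Step d3 cp = d3.modify cp.2 [] (fun l => l ++ [cp.1]) := by
  obtain ⟨c, p⟩ := cp
  show maldadD3Step d3 (c, p) = d3.insert p (d3.getD p [] ++ [c])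
  unfold maldadD3Step
  dsimp only
  split_ifs with h
  · rw [PySem.Dict.getD_of_not_contains d3 [] h]
    simp
  · rfl

-- one email list: B's fused step tracks (keys of dict2, regrouping of dict2)
theorem pv_inner (p : String) (es : List String) (d2 : PySem.Dict String String) :
    es.foldl (maldadAltStep p) (d2.keys, pvGroup d2.items)
      = ((es.foldl (maldadD2Inner p) d2).keys,
         pvGroup (es.foldl (maldadD2Inner p) d2).items) := by
  induction es generalizing d2 with
  | nil => rfl
  | cons i es ih =>
    simp only [List.foldl_cons]
    have hc : PySem.Set.contains d2.keys i = d2.contains i := by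
      simp [PySem.Set.contains, PySem.Dict.contains_eq_decide_mem_keys]
    by_cases h1 : PySem.Str.isIn "@" i = true
    · by_cases h2 : d2.contains i = true
      · have hA : maldadD2Inner p d2 i = d2 := by
          unfold maldadD2Inner; rw [h1, h2]; simp
        have hB : maldadAltStep p (d2.keys, pvGroup d2.items) i
            = (d2.keys, pvGroup d2.items) := by
          unfold maldadAltStep; dsimp only; rw [h1, hc, h2]; simp
        rw [hA, hB, ih]
      · have h2' : d2.contains i = false := by simpa using h2
        have hA : maldadD2Inner p d2 i = d2.insert i p := by
          unfold maldadD2Inner; rw [h1, h2']; simp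
        have hB : maldadAltStep p (d2.keys, pvGroup d2.items) i
            = ((d2.insert i p).keys, pvGroup (d2.insert i p).items) := by
          have hk : (d2.insert i p).keys = PySem.Set.add d2.keys i := by
            have hm : i ∉ d2.keys := fun hmem =>
              absurd ((PySem.Dict.contains_iff_mem_keys d2 i).mpr hmem) (by simp [h2'])
            rw [PySem.Dict.keys_insert_of_not_contains d2 p h2']
            simp [PySem.Set.add, hm]
          have hi : (d2.insert i p).items = d2.items ++ [(i, p)] := by
            exact PySem.Dict.items_insert_of_not_contains d2 p h2'
          unfold maldadAltStep; dsimp only; rw [h1, hc, h2']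
          simp only [Bool.and_true, Bool.not_false, if_pos]
          rw [hk, hi, pvGroup_append_singleton, maldadD3Step_eq_modify]
        rw [hA, hB, ih]
    · have h1' : PySem.Str.isIn "@" i = false := by simpa using h1
      have hA : maldadD2Inner p d2 i = d2 := by
        unfold maldadD2Inner; rw [h1']; simp
      have hB : maldadAltStep p (d2.keys, pvGroup d2.items) i
          = (d2.keys, pvGroup d2.items) := by
        unfold maldadAltStep; dsimp only; rw [h1']; simp
      rw [hA, hB, ih]

-- whole input: same invariant over the outer loop
theorem pv_outer (lista : List (String × List String)) (d2 : PySem.Dict String String) :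
    lista.foldl (fun st pc => pc.2.foldl (maldadAltStep pc.1) st) (d2.keys, pvGroup d2.items)
      = ((lista.foldl (fun d pc => pc.2.foldl (maldadD2Inner pc.1) d) d2).keys,
         pvGroup (lista.foldl (fun d pc => pc.2.foldl (maldadD2Inner pc.1) d) d2).items) := by
  induction lista generalizing d2 with
  | nil => rfl
  | cons pc rest ih =>
    simp only [List.foldl_cons]
    rw [pv_inner, ih]

-- ===== VERDICT (by name: the statement is the Claim_ definition above) =====
theorem maldad_spec : Claim_equal_maldad := by
  intro lista _
  show maldad lista = maldad_alt lista
  have h0 : ((PySem.Dict.empty : PySem.Dict String String).keys,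
      pvGroup (PySem.Dict.empty : PySem.Dict String String).items)
      = ((PySem.Set.empty : PySem.Set String),
         (PySem.Dict.empty : PySem.Dict String (List String))) := rfl
  unfold maldad maldad_alt maldadD2
  rw [← h0, pv_outer]
  rfl
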